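-- pv_equiv track=rewrite | github.com/hearues-zueke-github/python_programs | modulo_sequences/simple_linear_modulo_sequences.py | get_full_mult_cycle_if_possible
-- ===== SOURCE A (Python) =====
-- def get_full_mult_cycle_if_possible(a, b, m):
-- 	x = 0
-- 	s = set([0])
-- 	for _ in range(0, m):
-- 		x = (a * x + b) % m
-- 		if x in s:
-- 			break
-- 		s.add(x)
--
-- 	is_full_cycle = False
-- 	l_cycle = []
-- 	if len(s) == m:
-- 		is_full_cycle = True
-- 		x = 0
-- 		l_cycle = [0]
-- 		for _ in range(0, m-1):
-- 			x = (a * x + b) % m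
-- 			l_cycle.append(x)
--
-- 	return is_full_cycle, l_cycle
-- ===== SOURCE B (Python) =====
-- def get_full_mult_cycle_if_possible(a, b, m):
--     if m < 1:
--         return False, []
--     pos = {}
--     traj = []
--     x = 0
--     for _ in range(m):
--         if x in pos:
--             return False, []
--         pos[x] = len(traj)
--         traj.append(x)
--         x = (a * x + b) % m
--     return True, traj
-- ===== Notes on version B (the rewrite author's own statement) =====
-- stated objective: alternative
-- what changed: B runs one fused pass over a position dict: it tests each state before stepping, records the cycle list as it goes and returns (False, []) from inside the loop at the first repeated state, replacing A's seen-set detection loop plus set-size test plus a second full re-simulation loop that rebuilds the cycle.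
import Mathlib
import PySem

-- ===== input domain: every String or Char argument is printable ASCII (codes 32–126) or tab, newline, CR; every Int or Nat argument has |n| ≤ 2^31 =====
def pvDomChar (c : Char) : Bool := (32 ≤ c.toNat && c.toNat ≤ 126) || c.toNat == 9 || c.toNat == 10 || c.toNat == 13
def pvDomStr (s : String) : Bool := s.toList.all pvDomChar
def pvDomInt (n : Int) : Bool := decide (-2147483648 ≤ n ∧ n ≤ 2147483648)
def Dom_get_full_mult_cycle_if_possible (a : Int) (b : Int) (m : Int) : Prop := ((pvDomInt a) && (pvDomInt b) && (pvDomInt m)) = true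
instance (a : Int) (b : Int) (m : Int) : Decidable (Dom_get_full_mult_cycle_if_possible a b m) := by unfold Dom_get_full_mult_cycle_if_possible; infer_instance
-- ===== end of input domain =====

-- B is one fused pass over a position dict: each state is tested before stepping, the cycle list is
-- recorded as it goes and the loop returns (False, []) at the first repeated state; A detects with
-- a seen-set loop plus a set-size test and then re-simulates the cycle in a second loop.

-- ===== PORT A =====
-- first loop: x = (a*x+b) % m; break when x already in s; else s.add(x)
def pvA_loop1 (a b m : Int) : Nat → Int → PySem.Set Int → PySem.Set Int
  | 0, _, s => s
  | n+1, x, s =>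
      if PySem.Set.contains s (PySem.Int.mod (a * x + b) m) then s
      else pvA_loop1 a b m n (PySem.Int.mod (a * x + b) m)
             (PySem.Set.add s (PySem.Int.mod (a * x + b) m))

-- second loop: rebuild the cycle by appending successive iterates to l_cycle
def pvA_loop2 (a b m : Int) : Nat → Int → List Int → List Int
  | 0, _, acc => acc
  | n+1, x, acc =>
      pvA_loop2 a b m n (PySem.Int.mod (a * x + b) m) (acc ++ [PySem.Int.mod (a * x + b) m])

def get_full_mult_cycle_if_possible (a : Int) (b : Int) (m : Int) : Bool × List Int :=
  if PySem.Set.len (pvA_loop1 a b m m.toNat 0 (PySem.Set.ofList [0])) = m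
  then (true, pvA_loop2 a b m (m-1).toNat 0 [0])
  else (false, [])

-- ===== PORT B =====
-- Source B's single loop: 'if x in pos: return False, []; pos[x] = len(traj); traj.append(x); x = …';
-- the appends are accumulated in reverse and reversed once on the (True, traj) exit
def pvB_loop (a b m : Int) : Nat → Int → PySem.Dict Int Int → List Int → Bool × List Int
  | 0, _, _, acc => (true, acc.reverse)
  | n+1, x, pos, acc =>
      if PySem.Dict.contains pos x then (false, [])
      else pvB_loop a b m n (PySem.Int.mod (a * x + b) m)
             (PySem.Dict.insert pos x (acc.length : Int)) (x :: acc)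

def get_full_mult_cycle_if_possible_alt (a : Int) (b : Int) (m : Int) : Bool × List Int :=
  if m < 1 then (false, [])
  else pvB_loop a b m m.toNat 0 PySem.Dict.empty []

-- ===== PRECONDITION & SPEC =====
def Spec_get_full_mult_cycle_if_possible (a : Int) (b : Int) (m : Int) (out : Bool × List Int) : Prop := out = get_full_mult_cycle_if_possible_alt a b m
instance (a : Int) (b : Int) (m : Int) (out : Bool × List Int) : Decidable (Spec_get_full_mult_cycle_if_possible a b m out) := by unfold Spec_get_full_mult_cycle_if_possible; infer_instance

-- ===== CLAIM (what is proved, stated in full; the proofs are below) =====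
def Claim_equal_get_full_mult_cycle_if_possible : Prop := ∀ (a : Int) (b : Int) (m : Int), Dom_get_full_mult_cycle_if_possible a b m → Spec_get_full_mult_cycle_if_possible a b m (get_full_mult_cycle_if_possible a b m)

-- ===== LEMMAS AND PROOFS =====

-- the list of the next n iterates after x (proof-side helper)
def pvIter (a b m : Int) : Nat → Int → List Int
  | 0, _ => []
  | n+1, x => PySem.Int.mod (a * x + b) m :: pvIter a b m n (PySem.Int.mod (a * x + b) m)

-- the fresh prefix A's first loop traverses: iterates up to (excluding) the first one already seen
def pvStop (a b m : Int) : Nat → Int → PySem.Set Int → List Int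
  | 0, _, _ => []
  | n+1, x, s =>
      if PySem.Set.contains s (PySem.Int.mod (a * x + b) m) then []
      else PySem.Int.mod (a * x + b) m ::
             pvStop a b m n (PySem.Int.mod (a * x + b) m)
               (PySem.Set.add s (PySem.Int.mod (a * x + b) m))

-- B's loop re-expressed over the set of recorded keys (proof-side twin of pvB_loop)
def pvRunB (a b m : Int) : Nat → Int → PySem.Set Int → List Int → Bool × List Int
  | 0, _, _, acc => (true, acc.reverse)
  | n+1, x, s, acc =>
      if PySem.Set.contains s x then (false, [])
      else pvRunB a b m n (PySem.Int.mod (a * x + b) m) (PySem.Set.add s x) (x :: acc)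

theorem pvA_loop2_eq (a b m : Int) : ∀ (n : Nat) (x : Int) (acc : List Int),
    pvA_loop2 a b m n x acc = acc ++ pvIter a b m n x := by
  intro n
  induction n with
  | zero => intro x acc; simp [pvA_loop2, pvIter]
  | succ n ih => intro x acc; simp [pvA_loop2, pvIter, ih]

theorem pvIter_mem_bounds (a b m : Int) (hm : 0 < m) : ∀ (n : Nat) (x : Int),
    ∀ y ∈ pvIter a b m n x, 0 ≤ y ∧ y < m := by
  intro n
  induction n with
  | zero => intro x y hy; simp [pvIter] at hy
  | succ n ih =>
      intro x y hy
      simp only [pvIter, List.mem_cons] at hy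
      rcases hy with rfl | hy
      · exact ⟨PySem.Int.mod_nonneg _ hm, PySem.Int.mod_lt _ hm⟩
      · exact ih _ y hy

theorem pvIter_take (a b m : Int) : ∀ (n k : Nat) (x : Int),
    (pvIter a b m n x).take k = pvIter a b m (min k n) x := by
  intro n
  induction n with
  | zero => intro k x; simp [pvIter]
  | succ n ih =>
      intro k x
      cases k with
      | zero => simp [pvIter]
      | succ k =>
          simp only [pvIter, List.take_succ_cons, Nat.succ_min_succ]
          rw [ih]

-- pigeonhole: a nodup list of residues in [0, m) has at most m.toNat elements
theorem pvPigeon (m : Int) (l : List Int) (hnd : l.Nodup) (hb : ∀ y ∈ l, 0 ≤ y ∧ y < m) :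
    l.length ≤ m.toNat := by
  have hsub : l.toFinset ⊆ Finset.Ico (0 : Int) m := by
    intro y hy
    rw [List.mem_toFinset] at hy
    rcases hb y hy with ⟨h1, h2⟩
    simp [Finset.mem_Ico, h1, h2]
  have := Finset.card_le_card hsub
  rw [List.toFinset_card_of_nodup hnd, Int.card_Ico] at this
  simpa using this

-- A's loop appends exactly the fresh prefix to the seen set
theorem pvA_loop1_eq (a b m : Int) : ∀ (n : Nat) (x : Int) (s : PySem.Set Int),
    pvA_loop1 a b m n x s = s ++ pvStop a b m n x s := by
  intro n
  induction n with
  | zero => intro x s; simp [pvA_loop1, pvStop]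
  | succ n ih =>
      intro x s
      simp only [pvA_loop1, pvStop]
      by_cases hc : PySem.Set.contains s (PySem.Int.mod (a * x + b) m) = true
      · rw [if_pos hc, if_pos hc]; simp
      · rw [if_neg hc, if_neg hc, ih]
        have hmem : PySem.Int.mod (a * x + b) m ∉ s := fun h =>
          hc ((PySem.Set.contains_iff s _).mpr h)
        rw [PySem.Set.add_of_not_mem hmem]
        simp

-- the fresh prefix is an initial segment of the iterate list
theorem pvStop_take (a b m : Int) : ∀ (n : Nat) (x : Int) (s : PySem.Set Int),
    pvStop a b m n x s = (pvIter a b m n x).take (pvStop a b m n x s).length := by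
  intro n
  induction n with
  | zero => intro x s; simp [pvStop, pvIter]
  | succ n ih =>
      intro x s
      simp only [pvStop, pvIter]
      by_cases hc : PySem.Set.contains s (PySem.Int.mod (a * x + b) m) = true
      · rw [if_pos hc]; simp
      · rw [if_neg hc]
        simp only [List.length_cons, List.take_succ_cons, List.cons.injEq, true_and]
        exact ih _ _

-- the fresh prefix has no duplicates and avoids the seen set
theorem pvStop_nodup_fresh (a b m : Int) : ∀ (n : Nat) (x : Int) (s : PySem.Set Int),
    (pvStop a b m n x s).Nodup ∧ ∀ y ∈ pvStop a b m n x s, y ∉ s := by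
  intro n
  induction n with
  | zero => intro x s; simp [pvStop]
  | succ n ih =>
      intro x s
      simp only [pvStop]
      by_cases hc : PySem.Set.contains s (PySem.Int.mod (a * x + b) m) = true
      · rw [if_pos hc]; simp
      · rw [if_neg hc]
        have hmem : PySem.Int.mod (a * x + b) m ∉ s := fun h =>
          hc ((PySem.Set.contains_iff s _).mpr h)
        rcases ih (PySem.Int.mod (a * x + b) m)
          (PySem.Set.add s (PySem.Int.mod (a * x + b) m)) with ⟨hnd, hfr⟩
        have hmemadd : ∀ y ∈ pvStop a b m n (PySem.Int.mod (a * x + b) m)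
            (PySem.Set.add s (PySem.Int.mod (a * x + b) m)),
            y ∉ s ∧ y ≠ PySem.Int.mod (a * x + b) m := by
          intro y hy
          have := hfr y hy
          rw [PySem.Set.add_of_not_mem hmem] at this
          constructor
          · intro hys; exact this (List.mem_append.mpr (Or.inl hys))
          · intro hyx; exact this (List.mem_append.mpr (Or.inr (by simp [hyx])))
        refine ⟨List.nodup_cons.mpr ⟨fun hx => (hmemadd _ hx).2 rfl, hnd⟩, ?_⟩
        intro y hy
        rcases List.mem_cons.mp hy with rfl | hy
        · exact hmem
        · exact (hmemadd y hy).1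

theorem pvStop_len_le (a b m : Int) : ∀ (n : Nat) (x : Int) (s : PySem.Set Int),
    (pvStop a b m n x s).length ≤ n := by
  intro n
  induction n with
  | zero => intro x s; simp [pvStop]
  | succ n ih =>
      intro x s
      simp only [pvStop]
      by_cases hc : PySem.Set.contains s (PySem.Int.mod (a * x + b) m) = true
      · rw [if_pos hc]; simp
      · rw [if_neg hc]
        simpa using Nat.succ_le_succ (ih _ _)

-- elements of the fresh prefix are residues in [0, m)
theorem pvStop_mem_bounds (a b m : Int) (hm : 0 < m) (n : Nat) (x : Int) (s : PySem.Set Int) :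
    ∀ y ∈ pvStop a b m n x s, 0 ≤ y ∧ y < m := by
  intro y hy
  rw [pvStop_take] at hy
  exact pvIter_mem_bounds a b m hm n x y (List.mem_of_mem_take hy)

-- one more unit of fuel either changes nothing or the whole fuel was fresh
theorem pvStop_step (a b m : Int) : ∀ (n : Nat) (x : Int) (s : PySem.Set Int),
    pvStop a b m (n+1) x s = pvStop a b m n x s ∨
      (pvStop a b m (n+1) x s).length = n+1 := by
  intro n
  induction n with
  | zero =>
      intro x s
      by_cases hc : PySem.Set.contains s (PySem.Int.mod (a * x + b) m) = true
      · left
        show (if _ then _ else _) = _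
        rw [if_pos hc]
        rfl
      · right
        show (pvStop a b m (0+1) x s).length = 0+1
        have e : pvStop a b m (0+1) x s =
            PySem.Int.mod (a * x + b) m ::
              pvStop a b m 0 (PySem.Int.mod (a * x + b) m)
                (PySem.Set.add s (PySem.Int.mod (a * x + b) m)) := by
          show (if _ then _ else _) = _
          rw [if_neg hc]
        rw [e]
        rfl
  | succ n ih =>
      intro x s
      by_cases hc : PySem.Set.contains s (PySem.Int.mod (a * x + b) m) = true
      · left
        show (if _ then _ else _) = (if _ then _ else _)
        rw [if_pos hc, if_pos hc]
      · have e1 : pvStop a b m (n+1+1) x s =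
            PySem.Int.mod (a * x + b) m ::
              pvStop a b m (n+1) (PySem.Int.mod (a * x + b) m)
                (PySem.Set.add s (PySem.Int.mod (a * x + b) m)) := by
          show (if _ then _ else _) = _
          rw [if_neg hc]
        have e2 : pvStop a b m (n+1) x s =
            PySem.Int.mod (a * x + b) m ::
              pvStop a b m n (PySem.Int.mod (a * x + b) m)
                (PySem.Set.add s (PySem.Int.mod (a * x + b) m)) := by
          show (if _ then _ else _) = _
          rw [if_neg hc]
        rcases ih (PySem.Int.mod (a * x + b) m)
          (PySem.Set.add s (PySem.Int.mod (a * x + b) m)) with h | h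
        · left; rw [e1, e2, h]
        · right; rw [e1]; simp [h]

-- the seen check on PySem.Set.add, as a Bool equation
theorem pvSet_contains_add (s : PySem.Set Int) (x y : Int) :
    PySem.Set.contains (PySem.Set.add s x) y = (y == x || PySem.Set.contains s y) := by
  have h1 : (PySem.Set.contains (PySem.Set.add s x) y = true) ↔
      ((y == x || PySem.Set.contains s y) = true) := by
    simp only [Bool.or_eq_true, beq_iff_eq, PySem.Set.contains_iff, PySem.Set.mem_add]
    tauto
  exact Bool.eq_iff_iff.mpr h1

-- B's dict loop equals its set twin when pos's key membership agrees with s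
theorem pvB_loop_run (a b m : Int) : ∀ (n : Nat) (x : Int) (pos : PySem.Dict Int Int)
    (s : PySem.Set Int) (acc : List Int),
    (∀ y, PySem.Dict.contains pos y = PySem.Set.contains s y) →
    pvB_loop a b m n x pos acc = pvRunB a b m n x s acc := by
  intro n
  induction n with
  | zero => intro x pos s acc _; rfl
  | succ n ih =>
      intro x pos s acc hcont
      simp only [pvB_loop, pvRunB, hcont]
      by_cases hc : PySem.Set.contains s x = true
      · rw [if_pos hc, if_pos hc]
      · rw [if_neg hc, if_neg hc]
        apply ih
        intro y
        rw [PySem.Dict.contains_insert, pvSet_contains_add, hcont]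

-- B's set twin after the first (always fresh) step: full run ⟺ the fresh prefix uses all the fuel
theorem pvRunB_eq_stop (a b m : Int) : ∀ (n : Nat) (x : Int) (s : PySem.Set Int) (acc : List Int),
    pvRunB a b m n (PySem.Int.mod (a * x + b) m) s acc =
      if (pvStop a b m n x s).length = n
      then (true, acc.reverse ++ pvStop a b m n x s)
      else (false, []) := by
  intro n
  induction n with
  | zero => intro x s acc; simp [pvRunB, pvStop]
  | succ n ih =>
      intro x s acc
      simp only [pvRunB, pvStop]
      by_cases hc : PySem.Set.contains s (PySem.Int.mod (a * x + b) m) = true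
      · rw [if_pos hc, if_pos hc, if_neg (by simp)]
      · rw [if_neg hc, if_neg hc, ih]
        simp only [List.length_cons, Nat.add_right_cancel_iff]
        by_cases hl : (pvStop a b m n (PySem.Int.mod (a * x + b) m)
            (PySem.Set.add s (PySem.Int.mod (a * x + b) m))).length = n
        · rw [if_pos hl, if_pos hl]
          simp
        · rw [if_neg hl, if_neg hl]

theorem get_full_mult_cycle_if_possible_spec : Claim_equal_get_full_mult_cycle_if_possible := by
  intro a b m _
  unfold Spec_get_full_mult_cycle_if_possible
  unfold get_full_mult_cycle_if_possible get_full_mult_cycle_if_possible_alt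
  have hofl : PySem.Set.ofList ([0] : List Int) = [0] := rfl
  rw [hofl]
  by_cases hm : m < 1
  · have hn : m.toNat = 0 := by omega
    rw [hn]
    rw [if_neg (by simp [pvA_loop1]; omega), if_pos hm]
  · have hm1 : 1 ≤ m := by omega
    rw [if_neg hm]
    -- B's loop through its set twin
    have hK : m.toNat = (m.toNat - 1) + 1 := by omega
    have hB1 : pvB_loop a b m m.toNat 0 PySem.Dict.empty [] =
        pvRunB a b m m.toNat 0 PySem.Set.empty [] := by
      apply pvB_loop_run
      intro y
      rfl
    have hB2 : pvRunB a b m m.toNat 0 PySem.Set.empty [] =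
        pvRunB a b m (m.toNat - 1) (PySem.Int.mod (a * 0 + b) m) [0] [0] := by
      conv_lhs => rw [hK]
      show (if PySem.Set.contains PySem.Set.empty 0 then _ else _) = _
      rfl
    -- the fresh prefix with fuel m.toNat-1 is the same as with fuel m.toNat
    rcases pvStop_nodup_fresh a b m m.toNat 0 [0] with ⟨hnd, hfr⟩
    have h0L : (0 : Int) ∉ pvStop a b m m.toNat 0 [0] := fun h0 => hfr 0 h0 (by simp)
    have hb := pvStop_mem_bounds a b m (by omega) m.toNat 0 [0]
    have hLle : (pvStop a b m m.toNat 0 [0]).length ≤ m.toNat - 1 := by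
      have h1 : ((0 : Int) :: pvStop a b m m.toNat 0 [0]).Nodup := List.nodup_cons.mpr ⟨h0L, hnd⟩
      have h2 : ∀ y ∈ (0 : Int) :: pvStop a b m m.toNat 0 [0], 0 ≤ y ∧ y < m := by
        intro y hy
        rcases List.mem_cons.mp hy with rfl | hy
        · constructor <;> omega
        · exact hb y hy
      have := pvPigeon m _ h1 h2
      simp only [List.length_cons] at this
      omega
    have hstable : pvStop a b m m.toNat 0 [0] = pvStop a b m (m.toNat - 1) 0 [0] := by
      rcases pvStop_step a b m (m.toNat - 1) 0 [0] with h | h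
      · rw [← hK] at h; exact h
      · exfalso; rw [← hK] at h; omega
    -- A's fullness test: 1 + |fresh prefix| = m
    have hA : PySem.Set.len (pvA_loop1 a b m m.toNat 0 [0]) =
        1 + ((pvStop a b m m.toNat 0 [0]).length : Int) := by
      show ((pvA_loop1 a b m m.toNat 0 [0]).length : Int) = _
      rw [pvA_loop1_eq]
      simp only [List.length_append, List.length_cons, List.length_nil]
      push_cast; ring
    rw [hA, hB1, hB2, pvRunB_eq_stop, ← hstable]
    by_cases hfull : 1 + ((pvStop a b m m.toNat 0 [0]).length : Int) = m
    · have hlen : (pvStop a b m m.toNat 0 [0]).length = m.toNat - 1 := by omega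
      rw [if_pos hfull, if_pos hlen, pvA_loop2_eq]
      have hle : (pvStop a b m m.toNat 0 [0]).length ≤ m.toNat :=
        pvStop_len_le a b m m.toNat 0 [0]
      have hLpref : pvStop a b m m.toNat 0 [0] =
          pvIter a b m (pvStop a b m m.toNat 0 [0]).length 0 := by
        conv_lhs => rw [pvStop_take]
        rw [pvIter_take, Nat.min_eq_left hle]
      have hmn : (m - 1).toNat = (pvStop a b m m.toNat 0 [0]).length := by omega
      rw [hmn]
      conv_rhs => rw [hLpref]
      rfl
    · have hlen : ¬ (pvStop a b m m.toNat 0 [0]).length = m.toNat - 1 := by omega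
      rw [if_neg hfull, if_neg hlen]

-- ===== VERDICT (by name: the statement is the Claim_ definition above) =====
-- (the claim is proved directly above under its pinned name)
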